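-- pv_equiv track=rewrite | github.com/samarwal/Python-Projects | Assignment 5/a5_part1_300028989.py | largest_34
-- ===== SOURCE A (Python) =====
-- def largest_34(a):
--     '''(list)->int
--     returns the sum of the 3rd and 4th largest values in the list a
--     Precondition: a has at least 4 elements
--     '''
--     temp_list = []
--     for item in a:
--         temp_list.append(item)
--
--     big = max(temp_list)
--     temp_list.pop(temp_list.index(big))
--     sec_big = max(temp_list)
--     temp_list.pop(temp_list.index(sec_big))
--     thd_big = max(temp_list)
--     temp_list.pop(temp_list.index(thd_big))
--     frth_big = max(temp_list)
--     temp_list.pop(temp_list.index(frth_big))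
--     return frth_big + thd_big
-- ===== SOURCE B (Python) =====
-- def largest_34(a):
--     '''(list)->int
--     returns the sum of the 3rd and 4th largest values in the list a
--     Precondition: a has at least 4 elements
--     '''
--     s = sorted(a, reverse=True)
--     return s[2] + s[3]
-- ===== Notes on version B (the rewrite author's own statement) =====
-- stated objective: simpler
-- what changed: Replaces the copy loop and the four repeated max/index/pop scans with a single descending sort followed by direct indexing at positions 2 and 3.
import Mathlib
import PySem

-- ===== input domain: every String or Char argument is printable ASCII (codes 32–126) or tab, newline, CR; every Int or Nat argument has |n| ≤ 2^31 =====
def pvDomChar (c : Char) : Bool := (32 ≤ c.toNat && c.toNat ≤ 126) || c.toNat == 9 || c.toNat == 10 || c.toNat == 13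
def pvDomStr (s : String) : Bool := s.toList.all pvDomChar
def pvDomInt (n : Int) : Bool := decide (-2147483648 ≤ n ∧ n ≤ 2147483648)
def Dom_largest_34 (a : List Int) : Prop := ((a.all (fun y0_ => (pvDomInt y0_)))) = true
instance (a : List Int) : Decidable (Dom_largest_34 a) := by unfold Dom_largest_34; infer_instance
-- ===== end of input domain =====

-- B replaces A's four repeated max/index/pop scans with one descending sort plus direct
-- indexing (simpler); return values agree on every list of length ≥ 4.

-- ===== PORT A =====
-- Python repeats the same three lines four times: 'm = max(l); l.pop(l.index(m))'.
-- This helper is one such round: the max, the index of its first occurrence, the pop.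
def pvPopMax (l : List Int) : Option (Int × List Int) :=
  match PySem.List.max? l (fun x => x) with
  | none => none
  | some m =>
    match PySem.List.index? l m with
    | none => none
    | some i =>
      match PySem.List.pop? l (i : Int) with
      | none => none
      | some (_, rest) => some (m, rest)

def largest_34 (a : List Int) : Int :=
  let temp_list := a.foldl (fun acc item => acc ++ [item]) []
  match pvPopMax temp_list with
  | none => 0
  | some (_, t1) =>
    match pvPopMax t1 with
    | none => 0
    | some (_, t2) =>
      match pvPopMax t2 with
      | none => 0
      | some (thd_big, t3) =>
        match pvPopMax t3 with
        | none => 0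
        | some (frth_big, _) => frth_big + thd_big

-- ===== PORT B =====
def largest_34_alt (a : List Int) : Int :=
  let s := PySem.List.sorted a (fun x => x) true
  match PySem.List.pyGet? s 2, PySem.List.pyGet? s 3 with
  | some x, some y => x + y
  | _, _ => 0

-- ===== PRECONDITION & SPEC =====
-- Python A raises ValueError (max of an emptied list) when a has fewer than 4 elements.
def Pre_largest_34 (a : List Int) : Prop := 4 ≤ a.length
instance (a : List Int) : Decidable (Pre_largest_34 a) := by unfold Pre_largest_34; infer_instance

def pvWitness_largest_34 : List Int := [3, 1, 4, 1, 5]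

def Spec_largest_34 (a : List Int) (out : Int) : Prop := out = largest_34_alt a
instance (a : List Int) (out : Int) : Decidable (Spec_largest_34 a out) := by unfold Spec_largest_34; infer_instance

-- ===== CLAIM (what is proved, stated in full; the proofs are below) =====
def Claim_equal_largest_34 : Prop := ∀ (a : List Int), Dom_largest_34 a → Pre_largest_34 a → Spec_largest_34 a (largest_34 a)

-- ===== LEMMAS AND PROOFS =====

-- One A-round succeeds on a nonempty list, removes the first occurrence of the max,
-- and peels exactly the head off the descending-sorted list.
theorem pvPopMax_spec (l : List Int) (h : l ≠ []) :
    ∃ m rest, pvPopMax l = some (m, rest) ∧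
      PySem.List.sorted l (fun x => x) true = m :: PySem.List.sorted rest (fun x => x) true ∧
      rest.length + 1 = l.length := by
  obtain ⟨m, hm⟩ : ∃ m, PySem.List.max? l (fun x => x) = some m := by
    cases hmax : PySem.List.max? l (fun x => x) with
    | none => exact absurd ((PySem.List.max?_eq_none_iff l (fun x => x)).mp hmax) h
    | some m => exact ⟨m, rfl⟩
  have hmem : m ∈ l := PySem.List.max?_mem hm
  have hmax : ∀ y ∈ l, y ≤ m := PySem.List.max?_isMax hm
  obtain ⟨i, hi⟩ : ∃ i, PySem.List.index? l m = some i := by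
    cases hidx : PySem.List.index? l m with
    | none => exact absurd ((PySem.List.index?_eq_none_iff l m).mp hidx) (by simp [hmem])
    | some i => exact ⟨i, rfl⟩
  obtain ⟨hk, _, _⟩ := PySem.List.getElem_of_index?_eq_some hi
  have hpop : PySem.List.pop? l (i : Int) = some (l[i], l.eraseIdx i) :=
    PySem.List.pop?_natCast l i hk
  have herase : l.eraseIdx i = l.erase m := by
    rw [List.erase_eq_eraseIdx]
    have : List.idxOf? m l = some i := by
      rw [← PySem.List.index?_eq_idxOf?]; exact hi
    rw [this]
  have hidx' : List.idxOf? m l = some i := by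
    rw [← PySem.List.index?_eq_idxOf?]; exact hi
  refine ⟨m, l.eraseIdx i, by simp [pvPopMax, hm, hidx', hpop], ?_, ?_⟩
  · -- sorted desc of l = m :: sorted desc of (l minus first m)
    rw [herase]
    apply PySem.List.eq_of_perm_of_pairwise_le_of_injective (key := fun x : Int => -x)
      (fun x y hxy => by simpa using hxy)
    · exact ((PySem.List.sorted_perm l _ true).trans (List.perm_cons_erase hmem)).trans
        ((PySem.List.sorted_perm (l.erase m) _ true).symm.cons m)
    · exact (PySem.List.sorted_pairwise_rev l (fun x => x)).imp (by simp)
    · refine List.pairwise_cons.mpr ⟨fun y hy => ?_, ?_⟩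
      · have : y ∈ l := List.erase_subset ((PySem.List.mem_sorted _ _ _ _).mp hy)
        simpa using hmax y this
      · exact (PySem.List.sorted_pairwise_rev (l.erase m) (fun x => x)).imp (by simp)
  · rw [List.length_eraseIdx_of_lt hk]; omega

-- ===== VERDICT (by name: the statement is the Claim_ definition above) =====
theorem largest_34_spec : Claim_equal_largest_34 := by
  intro a _ hpre
  have hlen : 4 ≤ a.length := hpre
  show largest_34 a = largest_34_alt a
  have hcopy : a.foldl (fun acc item => acc ++ [item]) [] = a := by
    simpa using PySem.List.foldl_append_singleton_eq_self a ([] : List Int)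
  obtain ⟨m1, t1, h1, s1, n1⟩ := pvPopMax_spec a (by intro h; subst h; simp at hlen)
  obtain ⟨m2, t2, h2, s2, n2⟩ := pvPopMax_spec t1 (by intro h; subst h; simp at n1; omega)
  obtain ⟨m3, t3, h3, s3, n3⟩ := pvPopMax_spec t2 (by intro h; subst h; simp at n2; omega)
  obtain ⟨m4, t4, h4, s4, n4⟩ := pvPopMax_spec t3 (by intro h; subst h; simp at n3; omega)
  have hs : PySem.List.sorted a (fun x => x) true
      = m1 :: m2 :: m3 :: m4 :: PySem.List.sorted t4 (fun x => x) true := by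
    rw [s1, s2, s3, s4]
  simp only [largest_34, largest_34_alt, hcopy, h1, h2, h3, h4, hs]
  rw [show (2 : Int) = ((2 : Nat) : Int) from rfl, show (3 : Int) = ((3 : Nat) : Int) from rfl,
    PySem.List.pyGet?_natCast, PySem.List.pyGet?_natCast]
  simp
  ring
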